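-- pv_equiv track=rewrite | github.com/drizztSun/common_project | PythonLeetcode/leetcodeM/982_TripleswithBitwiseANDEqualToZero.py | doit2
-- ===== SOURCE A (Python) =====
-- def doit2(A):
--     """
--     :type A: List[int]
--     :rtype: int
--     """
--     d={}
--     res=0
--     for a in A:
--         for b in A:
--             t=a&b
--             if t in d:
--                 d[t]+=1
--             else:
--                 d[t]=1
--     for a in A:
--         for k,v in d.items():
--             if a&k==0:
--                 res+=v
--     return res
-- ===== SOURCE B (Python) =====
-- def doit2(A):
--     """
--     :type A: List[int]
--     :rtype: int
--     """
--     res = 0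
--     cache = {}
--     for b in A:
--         for c in A:
--             t = b & c
--             if t not in cache:
--                 cnt = 0
--                 for a in A:
--                     if a & t == 0:
--                         cnt += 1
--                 cache[t] = cnt
--             res += cache[t]
--     return res
-- ===== Notes on version B (the rewrite author's own statement) =====
-- stated objective: alternative
-- what changed: B fuses A's two phases into a single pass over the element pairs, memoizing for each pair-AND value the count of elements compatible with it, instead of A's building a multiplicity counter of all pair-ANDs and then rescanning its items for every element.
import Mathlib
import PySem

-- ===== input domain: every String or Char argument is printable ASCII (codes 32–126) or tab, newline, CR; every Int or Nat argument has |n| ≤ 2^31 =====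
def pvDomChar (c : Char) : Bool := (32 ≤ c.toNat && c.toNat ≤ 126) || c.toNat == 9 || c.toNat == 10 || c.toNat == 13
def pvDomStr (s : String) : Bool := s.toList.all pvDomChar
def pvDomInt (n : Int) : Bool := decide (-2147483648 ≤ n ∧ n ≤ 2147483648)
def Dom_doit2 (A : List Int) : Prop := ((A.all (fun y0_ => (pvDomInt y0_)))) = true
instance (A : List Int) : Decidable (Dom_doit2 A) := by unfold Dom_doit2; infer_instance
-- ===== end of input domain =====

-- B fuses A's two phases into one pass over the pairs, memoizing per AND-value the count of compatible elements (instead of counting AND multiplicities and rescanning); same answer, similar cost.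

-- ===== PORT A =====
def doit2 (A : List Int) : Int :=
  let d : PySem.Dict Int Int :=
    A.foldl (fun d a =>
      A.foldl (fun d b =>
        let t := PySem.Int.band a b
        if d.contains t then d.insert t (d.getD t 0 + 1) else d.insert t 1) d)
      PySem.Dict.empty
  A.foldl (fun res a =>
    d.items.foldl (fun res kv =>
      if PySem.Int.band a kv.1 = 0 then res + kv.2 else res) res) 0

-- ===== PORT B =====
def doit2_alt (A : List Int) : Int :=
  (A.foldl (fun s b =>
    A.foldl (fun s c =>
      let t := PySem.Int.band b c
      let cache := if s.2.contains t then s.2 else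
        s.2.insert t (A.foldl (fun cnt a => if PySem.Int.band a t = 0 then cnt + 1 else cnt) 0)
      (s.1 + cache.getD t 0, cache)) s) ((0 : Int), (PySem.Dict.empty : PySem.Dict Int Int))).1

-- ===== PRECONDITION & SPEC =====
def Spec_doit2 (A : List Int) (out : Int) : Prop := out = doit2_alt A
instance (A : List Int) (out : Int) : Decidable (Spec_doit2 A out) := by unfold Spec_doit2; infer_instance

-- ===== CLAIM (what is proved, stated in full; the proofs are below) =====
def Claim_equal_doit2 : Prop := ∀ (A : List Int), Dom_doit2 A → Spec_doit2 A (doit2 A)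

-- ===== LEMMAS AND PROOFS =====

-- the multiset of pairwise ANDs A builds its dictionary from
def pvPairs (A : List Int) : List Int := A.flatMap (fun a => A.map (fun b => PySem.Int.band a b))

-- A's 'if t in d: d[t]+=1 else: d[t]=1' is the counter step
lemma pvStep_eq (d : PySem.Dict Int Int) (t : Int) :
    (if d.contains t then d.insert t (d.getD t 0 + 1) else d.insert t 1)
      = d.insert t (d.getD t 0 + 1) := by
  by_cases h : d.contains t = true
  · simp [h]
  · simp only [Bool.not_eq_true] at h
    rw [PySem.Dict.getD_of_not_contains d (0:Int) h]
    simp [h]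

-- A's nested dictionary-building loops produce Counter(pvPairs A)
lemma pvDictA (A : List Int) :
    A.foldl (fun d a =>
      A.foldl (fun d b =>
        let t := PySem.Int.band a b
        if d.contains t then d.insert t (d.getD t 0 + 1) else d.insert t 1) d)
      PySem.Dict.empty
    = PySem.Dict.counter (pvPairs A) := by
  rw [← PySem.Dict.foldl_insert_getD_add_one_eq_counter, pvPairs, List.foldl_flatMap]
  simp only [List.foldl_map, pvStep_eq]

-- helper: sum of a list of casts is the cast of the Nat sum
lemma pvSum_cast (l : List Int) (f : Int → Nat) :
    (l.map (fun x => ((f x : Nat) : Int))).sum = ((l.map f).sum : Int) := by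
  simp [Function.comp_def, Nat.cast_list_sum]

-- summing the counter's multiplicities over the keys satisfying p counts p over the raw list
lemma pvSum_counts (P : List Int) (p : Int → Bool) :
    (((PySem.Set.ofList P).filter p).map (fun k => (P.count k : Int))).sum
      = (P.countP p : Int) := by
  have hperm : (PySem.Set.ofList P).Perm P.dedup :=
    (List.perm_ext_iff_of_nodup (PySem.Set.nodup_ofList P) P.nodup_dedup).mpr
      (fun a => by simp [PySem.Set.mem_ofList, List.mem_dedup])
  rw [((hperm.filter p).map (fun k => (P.count k : Int))).sum_eq,
      pvSum_cast, List.sum_map_count_dedup_filter_eq_countP]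

-- A's second phase, one outer iteration: scanning the counter's items
lemma pvItemsSum (P : List Int) (x r : Int) :
    (PySem.Dict.counter P).items.foldl
        (fun res kv => if PySem.Int.band x kv.1 = 0 then res + kv.2 else res) r
      = r + (P.countP (fun t => decide (PySem.Int.band x t = 0)) : Int) := by
  rw [PySem.Dict.items_counter, List.foldl_map]
  rw [PySem.List.foldl_ite_eq_foldl_filter (p := fun k => PySem.Int.band x k = 0)
        (f := fun res k => res + (P.count k : Int))]
  rw [PySem.List.foldl_add]
  rw [pvSum_counts]

-- sums over lists commute
lemma pvSum_swap (A P : List Int) (g : Int → Int → Int) :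
    (A.map (fun x => (P.map (g x)).sum)).sum
      = (P.map (fun t => (A.map (fun x => g x t)).sum)).sum := by
  induction A with
  | nil => simp
  | cons a A ih => simp [ih, List.sum_map_add]

-- B's memoizing pass: if the cache only holds correct counts, the fold adds one count per pair
lemma pvMemoFold (A P : List Int) : ∀ (res : Int) (cache : PySem.Dict Int Int),
    (∀ k v, cache.get? k = some v →
      v = (A.countP (fun a => decide (PySem.Int.band a k = 0)) : Int)) →
    (P.foldl (fun s t =>
        let cache := if s.2.contains t then s.2 else
          s.2.insert t (A.foldl (fun cnt a => if PySem.Int.band a t = 0 then cnt + 1 else cnt) 0)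
        (s.1 + cache.getD t 0, cache)) (res, cache)).1
      = res + (P.map (fun t =>
          (A.countP (fun a => decide (PySem.Int.band a t = 0)) : Int))).sum := by
  induction P with
  | nil => intro res cache _; simp
  | cons t P ih =>
    intro res cache hinv
    simp only [List.foldl_cons, List.map_cons, List.sum_cons]
    by_cases h : cache.contains t = true
    · obtain ⟨v, hv⟩ : ∃ v, cache.get? t = some v := by
        rcases hg : cache.get? t with _ | v
        · rw [PySem.Dict.contains_eq_isSome_get?, hg] at h; simp at h
        · exact ⟨v, rfl⟩
      simp only [h, if_true]
      rw [ih (res + cache.getD t 0) cache hinv,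
          PySem.Dict.getD_of_get?_eq_some cache 0 hv, hinv t v hv]
      ring
    · simp only [Bool.not_eq_true] at h
      simp only [h, Bool.false_eq_true, if_false]
      rw [ih _ _ ?hinv']
      case hinv' =>
        intro k v hk
        by_cases hkt : k = t
        · subst hkt
          rw [PySem.Dict.get?_insert_self] at hk
          rw [PySem.List.foldl_ite_add_one (fun a => PySem.Int.band a k = 0) A 0] at hk
          simpa using hk.symm
        · rw [PySem.Dict.get?_insert_of_ne _ _ hkt] at hk
          exact hinv k v hk
      rw [PySem.Dict.getD_insert_self,
          PySem.List.foldl_ite_add_one (fun a => PySem.Int.band a t = 0) A 0]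
      ring

-- ===== VERDICT (by name: the statement is the Claim_ definition above) =====
theorem doit2_spec : Claim_equal_doit2 := by
  intro A _
  unfold Spec_doit2 doit2 doit2_alt
  simp only [pvDictA]
  have hA : A.foldl (fun res a =>
        (PySem.Dict.counter (pvPairs A)).items.foldl
          (fun res kv => if PySem.Int.band a kv.1 = 0 then res + kv.2 else res) res) 0
      = 0 + (A.map (fun a =>
          ((pvPairs A).countP (fun t => decide (PySem.Int.band a t = 0)) : Int))).sum := by
    rw [PySem.List.foldl_congr_mem A _
          (fun res a => res + ((pvPairs A).countP (fun t => decide (PySem.Int.band a t = 0)) : Int)) 0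
          (fun res a _ => pvItemsSum (pvPairs A) a res)]
    exact PySem.List.foldl_add ..
  have hB : (A.foldl (fun s b =>
        A.foldl (fun s c =>
          let t := PySem.Int.band b c
          let cache := if s.2.contains t then s.2 else
            s.2.insert t (A.foldl (fun cnt a => if PySem.Int.band a t = 0 then cnt + 1 else cnt) 0)
          (s.1 + cache.getD t 0, cache)) s) ((0 : Int), (PySem.Dict.empty : PySem.Dict Int Int))).1
      = 0 + ((pvPairs A).map (fun t =>
          (A.countP (fun a => decide (PySem.Int.band a t = 0)) : Int))).sum := by
    rw [show A.foldl (fun s b =>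
          A.foldl (fun s c =>
            let t := PySem.Int.band b c
            let cache := if s.2.contains t then s.2 else
              s.2.insert t (A.foldl (fun cnt a => if PySem.Int.band a t = 0 then cnt + 1 else cnt) 0)
            (s.1 + cache.getD t 0, cache)) s) ((0 : Int), (PySem.Dict.empty : PySem.Dict Int Int))
        = (pvPairs A).foldl (fun s t =>
            let cache := if s.2.contains t then s.2 else
              s.2.insert t (A.foldl (fun cnt a => if PySem.Int.band a t = 0 then cnt + 1 else cnt) 0)
            (s.1 + cache.getD t 0, cache)) ((0 : Int), (PySem.Dict.empty : PySem.Dict Int Int)) by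
          rw [pvPairs, List.foldl_flatMap]
          simp only [List.foldl_map]]
    exact pvMemoFold A (pvPairs A) 0 PySem.Dict.empty
      (fun k v hk => by rw [PySem.Dict.get?_empty] at hk; cases hk)
  rw [hA, hB]
  congr 1
  calc (A.map (fun a => ((pvPairs A).countP (fun t => decide (PySem.Int.band a t = 0)) : Int))).sum
      = (A.map (fun a => ((pvPairs A).map (fun t =>
            if decide (PySem.Int.band a t = 0) = true then (1:Int) else 0)).sum)).sum := by
        simp only [PySem.List.sum_map_ite_one_zero]
    _ = ((pvPairs A).map (fun t => (A.map (fun a =>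
            if decide (PySem.Int.band a t = 0) = true then (1:Int) else 0)).sum)).sum := pvSum_swap ..
    _ = ((pvPairs A).map (fun t =>
            (A.countP (fun a => decide (PySem.Int.band a t = 0)) : Int))).sum := by
        simp only [PySem.List.sum_map_ite_one_zero]
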